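-- pv_equiv track=rewrite | github.com/mph-/lcapy | lcapy/utils.py | split_parens
-- ===== SOURCE A (Python) =====
-- def split_parens(s, delimiter=','):
--     """Split a string by delimiter except if in ()"""
--
--     parts = []
--     bracket_level = 0
--     current = []
--     for c in (s + delimiter):
--         if c == delimiter and bracket_level == 0:
--             parts.append(''.join(current))
--             current = []
--         else:
--             if c == '(':
--                 bracket_level += 1
--             elif c == ')':
--                 bracket_level -= 1
--             current.append(c)
--     if bracket_level != 0:
--         raise ValueError('Mismatched parentheses for ' + s)
--     return parts
-- ===== SOURCE B (Python) =====
-- def split_parens(s, delimiter=','):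
--     """Split a string by delimiter except if in ()"""
--
--     t = s + delimiter
--     bracket_level = 0
--     cuts = []
--     for i, c in enumerate(t):
--         if c == delimiter and bracket_level == 0:
--             cuts.append(i)
--         elif c == '(':
--             bracket_level += 1
--         elif c == ')':
--             bracket_level -= 1
--     if bracket_level != 0:
--         raise ValueError('Mismatched parentheses for ' + s)
--     return [t[a + 1:b] for a, b in zip([-1] + cuts, cuts)]
-- ===== Notes on version B (the rewrite author's own statement) =====
-- stated objective: alternative
-- what changed: B records the indices of depth-0 delimiter positions during the scan and builds the parts afterwards by slicing s+delimiter between consecutive recorded cut indices, instead of accumulating a character buffer that is flushed at each split.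
import Mathlib
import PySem

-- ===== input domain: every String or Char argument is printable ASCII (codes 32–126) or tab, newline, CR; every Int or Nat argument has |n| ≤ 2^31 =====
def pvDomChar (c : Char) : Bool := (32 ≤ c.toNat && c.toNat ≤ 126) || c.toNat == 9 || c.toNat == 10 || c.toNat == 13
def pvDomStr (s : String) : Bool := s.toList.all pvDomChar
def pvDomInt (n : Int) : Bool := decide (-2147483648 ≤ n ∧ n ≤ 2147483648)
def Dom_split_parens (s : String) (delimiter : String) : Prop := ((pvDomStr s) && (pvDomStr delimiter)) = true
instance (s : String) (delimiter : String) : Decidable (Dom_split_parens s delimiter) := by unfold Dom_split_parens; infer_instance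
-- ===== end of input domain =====

-- B records depth-0 delimiter indices and builds the parts by slicing afterwards (alternative
-- decomposition, same cost); A accumulates a character buffer flushed at each split.

-- ===== PORT A =====
-- one loop step of A: state = (parts, bracket_level, current); 'c == delimiter' is the Python
-- comparison of the 1-char string c with the delimiter string, ported as delim = [c]
def stepA (delim : List Char) (st : List String × Int × List Char) (c : Char) :
    List String × Int × List Char :=
  if delim = [c] ∧ st.2.1 = 0 then
    (st.1 ++ [String.ofList st.2.2], st.2.1, [])
  else
    (st.1,
     (if c = '(' then st.2.1 + 1 else if c = ')' then st.2.1 - 1 else st.2.1),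
     st.2.2 ++ [c])

def split_parens (s : String) (delimiter : String) : List String :=
  ((s.toList ++ delimiter.toList).foldl (stepA delimiter.toList)
    (([] : List String), (0 : Int), ([] : List Char))).1

-- ===== PORT B =====
-- one loop step of B: state = (bracket_level, cuts); ic = (index, character) from enumerate
def stepB (delim : List Char) (st : Int × List Int) (ic : Int × Char) : Int × List Int :=
  if delim = [ic.2] ∧ st.1 = 0 then (st.1, st.2 ++ [ic.1])
  else if ic.2 = '(' then (st.1 + 1, st.2)
  else if ic.2 = ')' then (st.1 - 1, st.2)
  else st

def split_parens_alt (s : String) (delimiter : String) : List String :=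
  let t := s.toList ++ delimiter.toList
  let fin := (PySem.List.enumerate t).foldl (stepB delimiter.toList) ((0 : Int), ([] : List Int))
  (((-1 : Int) :: fin.2).zip fin.2).map
    (fun ab => String.ofList (PySem.List.slice t (some (ab.1 + 1)) (some ab.2)))

-- ===== PRECONDITION & SPEC =====
-- the final bracket level of A's scan of s + delimiter (a delimiter character at level 0 is a
-- split and does not change the level); A raises ValueError exactly when it is nonzero
def parenLevel (delim : List Char) (t : List Char) : Int :=
  t.foldl (fun d c =>
    if delim = [c] ∧ d = 0 then d
    else if c = '(' then d + 1 else if c = ')' then d - 1 else d) 0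

-- Pre_ = A returns normally: the scan ends at bracket level 0 (otherwise Python raises ValueError)
def Pre_split_parens (s : String) (delimiter : String) : Prop :=
  parenLevel delimiter.toList (s.toList ++ delimiter.toList) = 0
instance (s : String) (delimiter : String) : Decidable (Pre_split_parens s delimiter) := by
  unfold Pre_split_parens; infer_instance

def pvWitness_split_parens : String × String := ("a,(b,c),d", ",")

def Spec_split_parens (s : String) (delimiter : String) (out : List String) : Prop := out = split_parens_alt s delimiter
instance (s : String) (delimiter : String) (out : List String) : Decidable (Spec_split_parens s delimiter out) := by unfold Spec_split_parens; infer_instance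

-- ===== CLAIM (what is proved, stated in full; the proofs are below) =====
def Claim_equal_split_parens : Prop := ∀ (s : String) (delimiter : String), Dom_split_parens s delimiter → Pre_split_parens s delimiter → Spec_split_parens s delimiter (split_parens s delimiter)

-- ===== LEMMAS AND PROOFS =====

-- the index after the last recorded cut (-1 when no cut yet)
def lastCut (cuts : List Int) : Int := cuts.getLastD (-1)

-- B's final assembly, as a function of the cut list
def partsOf (t : List Char) (cuts : List Int) : List String :=
  (((-1 : Int) :: cuts).zip cuts).map
    (fun ab => String.ofList (PySem.List.slice t (some (ab.1 + 1)) (some ab.2)))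

lemma zip_snoc (cuts : List Int) : ∀ (x n : Int),
    ((x :: (cuts ++ [n])).zip (cuts ++ [n])) = ((x :: cuts).zip cuts) ++ [(cuts.getLastD x, n)] := by
  induction cuts with
  | nil => intro x n; simp
  | cons y ys ih =>
    intro x n
    simp [ih y n]
    cases ys with
    | nil => simp
    | cons z zs => rfl

lemma lastCut_snoc (cuts : List Int) (n : Int) : lastCut (cuts ++ [n]) = n := by
  simp [lastCut]

lemma partsOf_snoc (t : List Char) (cuts : List Int) (n : Int) :
    partsOf t (cuts ++ [n]) =
      partsOf t cuts ++ [String.ofList (PySem.List.slice t (some (lastCut cuts + 1)) (some n))] := by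
  simp [partsOf, zip_snoc, lastCut]

lemma slice_self_empty (t : List Char) (a : Int) (ha : 0 ≤ a) :
    PySem.List.slice t (some a) (some a) = [] := by
  rw [PySem.List.slice_toNat t ha ha]; simp

lemma slice_extend (pre cs : List Char) (c : Char) (a : Int) (h0 : 0 ≤ a)
    (h1 : a ≤ (pre.length : Int)) :
    PySem.List.slice (pre ++ c :: cs) (some a) (some (pre.length : Int)) ++ [c]
      = PySem.List.slice (pre ++ c :: cs) (some a) (some ((pre.length : Int) + 1)) := by
  rw [PySem.List.slice_toNat _ h0 (by omega), PySem.List.slice_toNat _ h0 (by omega)]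
  have ha : a.toNat ≤ pre.length := by omega
  have hd : (pre ++ c :: cs).drop a.toNat = pre.drop a.toNat ++ c :: cs := by
    rw [List.drop_append_of_le_length ha]
  have hlen : (pre.drop a.toNat).length = pre.length - a.toNat := by simp
  have e1 : ((pre.length : Int)).toNat = pre.length := by omega
  have e2 : ((pre.length : Int) + 1).toNat = pre.length + 1 := by omega
  have hL : List.take (pre.length - a.toNat) (pre.drop a.toNat ++ c :: cs)
      = pre.drop a.toNat := by
    rw [List.take_append_of_le_length (by omega)]
    exact List.take_of_length_le (by omega)
  have hR : List.take (pre.length + 1 - a.toNat) (pre.drop a.toNat ++ c :: cs)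
      = pre.drop a.toNat ++ [c] := by
    rw [List.take_append, List.take_of_length_le (by omega)]
    congr 1
    have h1 : pre.length + 1 - a.toNat - (pre.drop a.toNat).length = 1 := by omega
    rw [h1]
    simp
  rw [hd, e1, e2, hL, hR]

-- the loop invariant: running A's loop from a state described by B's (depth, cuts) yields the
-- parts described by the cuts B's loop ends with
lemma loop_eq (delim : List Char) (rest : List Char) : ∀ (pre : List Char) (depth : Int) (cuts : List Int),
    0 ≤ lastCut cuts + 1 → lastCut cuts + 1 ≤ (pre.length : Int) →
    (List.foldl (stepA delim)
      (partsOf (pre ++ rest) cuts, depth,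
       PySem.List.slice (pre ++ rest) (some (lastCut cuts + 1)) (some (pre.length : Int)))
      rest).1
    = partsOf (pre ++ rest)
        (List.foldl (stepB delim) (depth, cuts)
          (PySem.List.enumerate rest (pre.length : Int))).2 := by
  induction rest with
  | nil => intro pre depth cuts _ _; simp [PySem.List.enumerate]
  | cons c cs ih =>
    intro pre depth cuts h0 h1
    rw [PySem.List.enumerate_cons]
    have hre : pre ++ c :: cs = (pre ++ [c]) ++ cs := by simp
    have hlen1 : ((pre ++ [c]).length : Int) = (pre.length : Int) + 1 := by simp
    by_cases h : delim = [c] ∧ depth = 0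
    · -- split: A flushes the buffer, B records the cut index
      have hA : stepA delim
          (partsOf (pre ++ c :: cs) cuts, depth,
           PySem.List.slice (pre ++ c :: cs) (some (lastCut cuts + 1)) (some (pre.length : Int))) c
          = (partsOf (pre ++ c :: cs) cuts ++
              [String.ofList (PySem.List.slice (pre ++ c :: cs) (some (lastCut cuts + 1))
                (some (pre.length : Int)))], depth, []) := by
        simp [stepA, h.1, h.2]
      have hB : stepB delim (depth, cuts) ((pre.length : Int), c)
          = (depth, cuts ++ [(pre.length : Int)]) := by
        simp [stepB, h.1, h.2]
      simp only [List.foldl_cons, hA, hB]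
      have his := ih (pre ++ [c]) depth (cuts ++ [(pre.length : Int)])
        (by rw [lastCut_snoc]; omega) (by rw [lastCut_snoc]; simp)
      rw [← hre, hlen1, lastCut_snoc, slice_self_empty _ _ (by omega), partsOf_snoc] at his
      exact his
    · -- no split: A appends c to the buffer, B leaves the cuts unchanged; both update the level
      have hA : stepA delim
          (partsOf (pre ++ c :: cs) cuts, depth,
           PySem.List.slice (pre ++ c :: cs) (some (lastCut cuts + 1)) (some (pre.length : Int))) c
          = (partsOf (pre ++ c :: cs) cuts,
             (if c = '(' then depth + 1 else if c = ')' then depth - 1 else depth),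
             PySem.List.slice (pre ++ c :: cs) (some (lastCut cuts + 1)) (some (pre.length : Int))
               ++ [c]) := by
        simp only [stepA, if_neg h]
      have hB : stepB delim (depth, cuts) ((pre.length : Int), c)
          = ((if c = '(' then depth + 1 else if c = ')' then depth - 1 else depth), cuts) := by
        simp only [stepB, if_neg h]
        split_ifs <;> rfl
      simp only [List.foldl_cons, hA, hB]
      rw [slice_extend pre cs c (lastCut cuts + 1) h0 h1]
      have his := ih (pre ++ [c])
        (if c = '(' then depth + 1 else if c = ')' then depth - 1 else depth) cuts
        h0 (by simp; omega)
      rw [← hre, hlen1] at his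
      exact his

-- ===== VERDICT (by name: the statement is the Claim_ definition above) =====
theorem split_parens_spec : Claim_equal_split_parens := by
  intro s delimiter _ _
  unfold Spec_split_parens split_parens split_parens_alt
  have h := loop_eq delimiter.toList (s.toList ++ delimiter.toList) [] 0 []
    (by simp [lastCut]) (by simp [lastCut])
  simp only [List.nil_append, List.length_nil, Nat.cast_zero] at h
  have hz : PySem.List.slice (s.toList ++ delimiter.toList) none (some (0 : Int)) = [] := by
    rw [PySem.List.slice_to]
    · simp
    · decide
  have hinit : (partsOf (s.toList ++ delimiter.toList) [], (0 : Int),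
      PySem.List.slice (s.toList ++ delimiter.toList) (some (lastCut [] + 1)) (some (0 : Int)))
      = (([] : List String), (0 : Int), ([] : List Char)) := by
    simp [partsOf, lastCut, hz]
  rw [hinit] at h
  simpa [partsOf] using h
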